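-- pv_equiv track=rewrite | github.com/PortalRecruit/PortalRecruit | src/film.py | analyze_tendencies
-- ===== SOURCE A (Python) =====
-- from typing import List, Dict
--
-- def analyze_tendencies(clips_list: List[str]) -> Dict[str, int]:
--     totals = {
--         "Drive Left": 0,
--         "Drive Right": 0,
--         "Left Shoulder": 0,
--         "Right Shoulder": 0,
--         "Catch & Shoot": 0,
--         "Dribble Jumper": 0,
--     }
--     for clip in clips_list:
--         txt = clip.lower()
--         if "drive left" in txt:
--             totals["Drive Left"] += 1
--         if "drive right" in txt:
--             totals["Drive Right"] += 1
--         if "left shoulder" in txt: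
--             totals["Left Shoulder"] += 1
--         if "right shoulder" in txt:
--             totals["Right Shoulder"] += 1
--         if "catch & shoot" in txt or "catch and shoot" in txt:
--             totals["Catch & Shoot"] += 1
--         if "dribble jumper" in txt or "pull-up" in txt:
--             totals["Dribble Jumper"] += 1
--     totals = {k: v for k, v in totals.items() if v > 0}
--     total_actions = sum(totals.values()) or 1
--     return {k: int(round((v / total_actions) * 100)) for k, v in totals.items()}
-- ===== SOURCE B (Python) =====
-- from typing import List, Dict
--
-- _LABELS = ["Drive Left", "Drive Right", "Left Shoulder", "Right Shoulder",
--            "Catch & Shoot", "Dribble Jumper"]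
-- _PATTERNS = [["drive left"], ["drive right"], ["left shoulder"], ["right shoulder"],
--              ["catch & shoot", "catch and shoot"], ["dribble jumper", "pull-up"]]
--
-- def analyze_tendencies(clips_list: List[str]) -> Dict[str, int]:
--     def hits(clip):
--         t = clip.lower()
--         return [1 if any(p in t for p in pats) else 0 for pats in _PATTERNS]
--
--     def count(lo, hi):
--         # divide and conquer over the index range [lo, hi)
--         if hi - lo == 0:
--             return [0, 0, 0, 0, 0, 0]
--         if hi - lo == 1:
--             return hits(clips_list[lo])
--         mid = (lo + hi) // 2
--         return [x + y for x, y in zip(count(lo, mid), count(mid, hi))]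
--
--     vec = count(0, len(clips_list))
--     pairs = [(lab, c) for lab, c in zip(_LABELS, vec) if c > 0]
--     total = sum(c for _, c in pairs) or 1
--     return {lab: int(round(c / total * 100)) for lab, c in pairs}
-- ===== Notes on version B (the rewrite author's own statement) =====
-- stated objective: alternative
-- what changed: B replaces A's single left-to-right pass that mutates a dict of six counters with a divide-and-conquer reduction: it recursively splits the clip index range, produces a 6-vector of 0/1 hit flags at each singleton leaf, and merges halves by pointwise vector addition before the filter/percentage step.
import Mathlib
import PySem

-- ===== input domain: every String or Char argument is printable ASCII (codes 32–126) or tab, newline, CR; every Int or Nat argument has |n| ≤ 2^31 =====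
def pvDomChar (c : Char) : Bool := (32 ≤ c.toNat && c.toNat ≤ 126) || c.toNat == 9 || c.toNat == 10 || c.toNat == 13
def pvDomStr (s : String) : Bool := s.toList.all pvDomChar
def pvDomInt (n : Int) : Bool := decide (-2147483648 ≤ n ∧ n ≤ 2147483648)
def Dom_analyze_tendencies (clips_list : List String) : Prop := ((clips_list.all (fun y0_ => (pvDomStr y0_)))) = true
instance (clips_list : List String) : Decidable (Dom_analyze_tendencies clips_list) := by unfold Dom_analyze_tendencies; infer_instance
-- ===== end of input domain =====

-- B replaces A's single pass mutating a dict of six counters with a divide-and-conquer reduction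
-- over the index range (singleton leaves give 6-vectors of 0/1 flags, halves merge by vector
-- addition); same cost class, no speed claim. Shared helper pvRoundPct is the exact integer
-- emulation of CPython's `int(round((v/t)*100))` (IEEE-754 double arithmetic with round-half-even),
-- used by both ports for the common final percentage step.

-- round-half-even of n/d (d > 0)
def pvRne (n d : Nat) : Nat :=
  let q := n / d
  let r := n % d
  if 2 * r < d then q else if d < 2 * r then q + 1 else if q % 2 = 0 then q else q + 1

-- double(v/t): mantissa candidate at scale k (value v/t * 2^k, rounded to integer half-even)
def pvDivAt (v t : Nat) (k : Int) : Nat :=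
  if 0 ≤ k then pvRne (v <<< k.toNat) t else pvRne v (t <<< (-k).toNat)

-- exact integer emulation of CPython's int(round((v/t)*100)) for 1 ≤ v ≤ t:
-- round v/t to a 53-bit double, multiply by 100 and re-round to 53 bits, then round half-even to an integer
def pvRoundPct (v t : Int) : Int :=
  let vn := v.toNat
  let tn := t.toNat
  let k0 : Int := 53 + (PySem.Int.bitLength t : Int) - (PySem.Int.bitLength v : Int)
  let m1 := pvDivAt vn tn k0
  let mk : Nat × Int :=
    if m1 < 2 ^ 53 then (m1, k0)
    else
      let m2 := pvDivAt vn tn (k0 - 1)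
      if m2 < 2 ^ 53 then (m2, k0 - 1) else (pvDivAt vn tn (k0 - 2), k0 - 2)
  let e : Int := - mk.2
  let p := mk.1 * 100
  let s : Int := (PySem.Int.bitLength (p : Int) : Int) - 53
  let me : Nat × Int := if 0 < s then (pvRne p (2 ^ s.toNat), e + s) else (p, e)
  if 0 ≤ me.2 then ((me.1 <<< me.2.toNat : Nat) : Int) else (pvRne me.1 (2 ^ (-me.2).toNat) : Int)

-- ===== PORT A =====
def analyze_tendencies (clips_list : List String) : List (String × Int) :=
  let totals : PySem.Dict String Int :=
    (((((PySem.Dict.empty.insert "Drive Left" 0).insert "Drive Right" 0).insert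
        "Left Shoulder" 0).insert "Right Shoulder" 0).insert "Catch & Shoot" 0).insert "Dribble Jumper" 0
  let totals := clips_list.foldl (fun d clip =>
    let txt := PySem.Str.lower clip
    let d := if PySem.Str.isIn "drive left" txt then d.modify "Drive Left" 0 (· + 1) else d
    let d := if PySem.Str.isIn "drive right" txt then d.modify "Drive Right" 0 (· + 1) else d
    let d := if PySem.Str.isIn "left shoulder" txt then d.modify "Left Shoulder" 0 (· + 1) else d
    let d := if PySem.Str.isIn "right shoulder" txt then d.modify "Right Shoulder" 0 (· + 1) else d
    let d := if PySem.Str.isIn "catch & shoot" txt || PySem.Str.isIn "catch and shoot" txt then d.modify "Catch & Shoot" 0 (· + 1) else d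
    let d := if PySem.Str.isIn "dribble jumper" txt || PySem.Str.isIn "pull-up" txt then d.modify "Dribble Jumper" 0 (· + 1) else d
    d) totals
  -- {k: v for k, v in totals.items() if v > 0} (dict comprehension = insert in iteration order)
  let totals2 : PySem.Dict String Int :=
    (totals.items.filter (fun p => p.2 > 0)).foldl (fun d p => d.insert p.1 p.2) PySem.Dict.empty
  let s := totals2.values.sum
  let total_actions : Int := if s = 0 then 1 else s   -- sum(...) or 1
  totals2.items.map (fun p => (p.1, pvRoundPct p.2 total_actions))

-- ===== PORT B =====
def pvLabels : List String :=
  ["Drive Left", "Drive Right", "Left Shoulder", "Right Shoulder", "Catch & Shoot", "Dribble Jumper"]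
def pvPatterns : List (List String) :=
  [["drive left"], ["drive right"], ["left shoulder"], ["right shoulder"],
   ["catch & shoot", "catch and shoot"], ["dribble jumper", "pull-up"]]

-- Source B's hits(clip): 0/1 flag per pattern group, lowering the clip once
def pvHits (clip : String) : List Int :=
  let t := PySem.Str.lower clip
  pvPatterns.map (fun pats => if pats.any (fun p => PySem.Str.isIn p t) then (1 : Int) else 0)

-- Source B's count(lo, hi): divide and conquer over the index range [lo, hi)
def pvCountRange (clips_list : List String) (lo hi : Nat) : List Int :=
  if hi - lo = 0 then [0, 0, 0, 0, 0, 0]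
  else if hi - lo = 1 then pvHits (clips_list.getD lo "")   -- clips_list[lo], in range whenever hi ≤ len
  else
    let mid := (lo + hi) / 2
    (pvCountRange clips_list lo mid).zipWith (· + ·) (pvCountRange clips_list mid hi)
termination_by hi - lo
decreasing_by all_goals omega

def analyze_tendencies_alt (clips_list : List String) : List (String × Int) :=
  let vec := pvCountRange clips_list 0 clips_list.length
  let pairs := (pvLabels.zip vec).filter (fun p => p.2 > 0)
  let total_s := (pairs.map (·.2)).sum
  let total : Int := if total_s = 0 then 1 else total_s   -- sum(...) or 1
  pairs.map (fun p => (p.1, pvRoundPct p.2 total))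

-- ===== PRECONDITION & SPEC =====
def Spec_analyze_tendencies (clips_list : List String) (out : List (String × Int)) : Prop := out = analyze_tendencies_alt clips_list
instance (clips_list : List String) (out : List (String × Int)) : Decidable (Spec_analyze_tendencies clips_list out) := by unfold Spec_analyze_tendencies; infer_instance

-- ===== CLAIM (what is proved, stated in full; the proofs are below) =====
def Claim_equal_analyze_tendencies : Prop := ∀ (clips_list : List String), Dom_analyze_tendencies clips_list → Spec_analyze_tendencies clips_list (analyze_tendencies clips_list)

-- ===== LEMMAS AND PROOFS =====

def pvMkd (a b c d e f : Int) : PySem.Dict String Int :=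
  PySem.Dict.mk [("Drive Left", a), ("Drive Right", b), ("Left Shoulder", c),
                 ("Right Shoulder", d), ("Catch & Shoot", e), ("Dribble Jumper", f)]

theorem pvCM1 (cond : Prop) [Decidable cond] (a b c d e f : Int) :
    (if cond then (pvMkd a b c d e f).modify "Drive Left" 0 (· + 1) else pvMkd a b c d e f)
      = pvMkd (a + if cond then 1 else 0) b c d e f := by
  by_cases h : cond <;> simp [h] <;> rfl
theorem pvCM2 (cond : Prop) [Decidable cond] (a b c d e f : Int) :
    (if cond then (pvMkd a b c d e f).modify "Drive Right" 0 (· + 1) else pvMkd a b c d e f)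
      = pvMkd a (b + if cond then 1 else 0) c d e f := by
  by_cases h : cond <;> simp [h] <;> rfl
theorem pvCM3 (cond : Prop) [Decidable cond] (a b c d e f : Int) :
    (if cond then (pvMkd a b c d e f).modify "Left Shoulder" 0 (· + 1) else pvMkd a b c d e f)
      = pvMkd a b (c + if cond then 1 else 0) d e f := by
  by_cases h : cond <;> simp [h] <;> rfl
theorem pvCM4 (cond : Prop) [Decidable cond] (a b c d e f : Int) :
    (if cond then (pvMkd a b c d e f).modify "Right Shoulder" 0 (· + 1) else pvMkd a b c d e f)
      = pvMkd a b c (d + if cond then 1 else 0) e f := by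
  by_cases h : cond <;> simp [h] <;> rfl
theorem pvCM5 (cond : Prop) [Decidable cond] (a b c d e f : Int) :
    (if cond then (pvMkd a b c d e f).modify "Catch & Shoot" 0 (· + 1) else pvMkd a b c d e f)
      = pvMkd a b c d (e + if cond then 1 else 0) f := by
  by_cases h : cond <;> simp [h] <;> rfl
theorem pvCM6 (cond : Prop) [Decidable cond] (a b c d e f : Int) :
    (if cond then (pvMkd a b c d e f).modify "Dribble Jumper" 0 (· + 1) else pvMkd a b c d e f)
      = pvMkd a b c d e (f + if cond then 1 else 0) := by
  by_cases h : cond <;> simp [h] <;> rfl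

def pvQ1 (x : String) : Bool := PySem.Str.isIn "drive left" (PySem.Str.lower x)
def pvQ2 (x : String) : Bool := PySem.Str.isIn "drive right" (PySem.Str.lower x)
def pvQ3 (x : String) : Bool := PySem.Str.isIn "left shoulder" (PySem.Str.lower x)
def pvQ4 (x : String) : Bool := PySem.Str.isIn "right shoulder" (PySem.Str.lower x)
def pvQ5 (x : String) : Bool := PySem.Str.isIn "catch & shoot" (PySem.Str.lower x) || PySem.Str.isIn "catch and shoot" (PySem.Str.lower x)
def pvQ6 (x : String) : Bool := PySem.Str.isIn "dribble jumper" (PySem.Str.lower x) || PySem.Str.isIn "pull-up" (PySem.Str.lower x)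

-- the six segment counts as a vector
def pvVec (l : List String) : List Int :=
  [(l.countP pvQ1 : Int), (l.countP pvQ2 : Int), (l.countP pvQ3 : Int),
   (l.countP pvQ4 : Int), (l.countP pvQ5 : Int), (l.countP pvQ6 : Int)]

theorem pvFoldA (l : List String) (a b c d e f : Int) :
    l.foldl (fun d clip =>
      let txt := PySem.Str.lower clip
      let d := if PySem.Str.isIn "drive left" txt then d.modify "Drive Left" 0 (· + 1) else d
      let d := if PySem.Str.isIn "drive right" txt then d.modify "Drive Right" 0 (· + 1) else d
      let d := if PySem.Str.isIn "left shoulder" txt then d.modify "Left Shoulder" 0 (· + 1) else d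
      let d := if PySem.Str.isIn "right shoulder" txt then d.modify "Right Shoulder" 0 (· + 1) else d
      let d := if PySem.Str.isIn "catch & shoot" txt || PySem.Str.isIn "catch and shoot" txt then d.modify "Catch & Shoot" 0 (· + 1) else d
      let d := if PySem.Str.isIn "dribble jumper" txt || PySem.Str.isIn "pull-up" txt then d.modify "Dribble Jumper" 0 (· + 1) else d
      d) (pvMkd a b c d e f)
    = pvMkd (a + l.countP pvQ1) (b + l.countP pvQ2) (c + l.countP pvQ3)
            (d + l.countP pvQ4) (e + l.countP pvQ5) (f + l.countP pvQ6) := by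
  induction l generalizing a b c d e f with
  | nil => simp
  | cons x l ih =>
    rw [List.foldl_cons]
    show List.foldl _ ((fun (d : PySem.Dict String Int) (clip : String) =>
      let txt := PySem.Str.lower clip
      let d := if PySem.Str.isIn "drive left" txt then d.modify "Drive Left" 0 (· + 1) else d
      let d := if PySem.Str.isIn "drive right" txt then d.modify "Drive Right" 0 (· + 1) else d
      let d := if PySem.Str.isIn "left shoulder" txt then d.modify "Left Shoulder" 0 (· + 1) else d
      let d := if PySem.Str.isIn "right shoulder" txt then d.modify "Right Shoulder" 0 (· + 1) else d
      let d := if PySem.Str.isIn "catch & shoot" txt || PySem.Str.isIn "catch and shoot" txt then d.modify "Catch & Shoot" 0 (· + 1) else d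
      let d := if PySem.Str.isIn "dribble jumper" txt || PySem.Str.isIn "pull-up" txt then d.modify "Dribble Jumper" 0 (· + 1) else d
      d) (pvMkd a b c d e f) x) l = _
    rw [show ((fun (d : PySem.Dict String Int) (clip : String) =>
      let txt := PySem.Str.lower clip
      let d := if PySem.Str.isIn "drive left" txt then d.modify "Drive Left" 0 (· + 1) else d
      let d := if PySem.Str.isIn "drive right" txt then d.modify "Drive Right" 0 (· + 1) else d
      let d := if PySem.Str.isIn "left shoulder" txt then d.modify "Left Shoulder" 0 (· + 1) else d
      let d := if PySem.Str.isIn "right shoulder" txt then d.modify "Right Shoulder" 0 (· + 1) else d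
      let d := if PySem.Str.isIn "catch & shoot" txt || PySem.Str.isIn "catch and shoot" txt then d.modify "Catch & Shoot" 0 (· + 1) else d
      let d := if PySem.Str.isIn "dribble jumper" txt || PySem.Str.isIn "pull-up" txt then d.modify "Dribble Jumper" 0 (· + 1) else d
      d) (pvMkd a b c d e f) x)
      = pvMkd (a + if pvQ1 x then 1 else 0) (b + if pvQ2 x then 1 else 0) (c + if pvQ3 x then 1 else 0)
              (d + if pvQ4 x then 1 else 0) (e + if pvQ5 x then 1 else 0) (f + if pvQ6 x then 1 else 0) from by
        simp only [pvQ1, pvQ2, pvQ3, pvQ4, pvQ5, pvQ6, pvCM1, pvCM2, pvCM3, pvCM4, pvCM5, pvCM6]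
        rfl]
    rw [ih]
    simp only [List.countP_cons, pvQ1, pvQ2, pvQ3, pvQ4, pvQ5, pvQ6, pvMkd,
      PySem.Dict.mk.injEq, List.cons.injEq, Prod.mk.injEq]
    refine ⟨⟨trivial, ?_⟩, ⟨trivial, ?_⟩, ⟨trivial, ?_⟩, ⟨trivial, ?_⟩, ⟨trivial, ?_⟩, ⟨trivial, ?_⟩, trivial⟩ <;>
      (push_cast [apply_ite]; split_ifs <;> omega)

theorem pvItemsOfList (L : List (String × Int)) (h : (L.map Prod.fst).Nodup) :
    (L.foldl (fun d p => d.insert p.1 p.2) PySem.Dict.empty).items = L := by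
  have := PySem.Dict.items_foldl_insert_fresh L Prod.fst Prod.snd PySem.Dict.empty
    (fun a _ => by simp [PySem.Dict.contains_empty]) h
  simpa using this

theorem pvNodup (a b c d e f : Int) :
    ((List.filter (fun p => decide (p.2 > 0)) (pvMkd a b c d e f).items).map Prod.fst).Nodup := by
  apply List.Nodup.sublist ((List.filter_sublist).map Prod.fst)
  simp [pvMkd]

-- hits on a single clip is the segment vector of the singleton
theorem pvHitsEq (x : String) : pvHits x = pvVec [x] := by
  simp [pvHits, pvVec, pvPatterns, pvQ1, pvQ2, pvQ3, pvQ4, pvQ5, pvQ6, List.countP_cons,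
    List.countP_nil, apply_ite (fun n : Nat => (n : Int))]

theorem pvVecAppend (l1 l2 : List String) :
    (pvVec l1).zipWith (· + ·) (pvVec l2) = pvVec (l1 ++ l2) := by
  simp [pvVec, List.countP_append]

-- invariant of the divide-and-conquer: count on [lo,hi) = segment counts of clips[lo:hi]
theorem pvCountRangeEq (clips : List String) : ∀ n lo hi, hi - lo = n → hi ≤ clips.length →
    pvCountRange clips lo hi = pvVec ((clips.drop lo).take (hi - lo)) := by
  intro n
  induction n using Nat.strong_induction_on with
  | _ n ih =>
    intro lo hi hn hhi
    rw [pvCountRange]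
    by_cases h0 : hi - lo = 0
    · simp [h0, pvVec]
    · by_cases h1 : hi - lo = 1
      · have hlo : lo < clips.length := by omega
        have hseg : List.take 1 (List.drop lo clips) = [clips.getD lo ""] := by
          rw [List.getD_eq_getElem _ _ hlo, List.take_one, List.head?_drop]
          simp [hlo]
        simp only [h1]
        norm_num [pvHitsEq, hseg]
      · simp only [h0, if_false, h1, if_false]
        have hmid1 : lo < (lo + hi) / 2 := by omega
        have hmid2 : (lo + hi) / 2 < hi := by omega
        rw [ih ((lo + hi) / 2 - lo) (by omega) lo _ rfl (by omega),
            ih (hi - (lo + hi) / 2) (by omega) _ hi rfl hhi]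
        rw [pvVecAppend]
        congr 1
        have : clips.drop ((lo + hi) / 2) = (clips.drop lo).drop ((lo + hi) / 2 - lo) := by
          rw [List.drop_drop]; congr 1; omega
        rw [this, ← List.take_add]
        congr 1
        omega

set_option maxHeartbeats 1000000 in
theorem pvZipFilter (clips : List String) :
    (pvLabels.zip (pvVec clips)).filter (fun p => p.2 > 0)
    = List.filter (fun p => decide (p.2 > 0))
        (pvMkd (List.countP pvQ1 clips) (List.countP pvQ2 clips) (List.countP pvQ3 clips)
               (List.countP pvQ4 clips) (List.countP pvQ5 clips) (List.countP pvQ6 clips)).items := by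
  rfl

theorem pvMain (clips : List String) :
    analyze_tendencies clips = analyze_tendencies_alt clips := by
  unfold analyze_tendencies analyze_tendencies_alt
  have h0 : ((((((PySem.Dict.empty.insert "Drive Left" (0:Int)).insert "Drive Right" 0).insert
      "Left Shoulder" 0).insert "Right Shoulder" 0).insert "Catch & Shoot" 0).insert "Dribble Jumper" 0)
      = pvMkd 0 0 0 0 0 0 := rfl
  simp only [h0, pvFoldA]
  simp only [zero_add]
  rw [pvCountRangeEq clips (clips.length - 0) 0 clips.length rfl (le_refl _)]
  simp only [List.drop_zero, Nat.sub_zero, List.take_length]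
  rw [pvZipFilter clips]
  simp only [PySem.Dict.values]
  rw [pvItemsOfList _ (pvNodup _ _ _ _ _ _)]

-- ===== VERDICT (by name: the statement is the Claim_ definition above) =====
theorem analyze_tendencies_spec : Claim_equal_analyze_tendencies := by
  intro clips _
  exact pvMain clips
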